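-- pv_equiv track=rewrite | github.com/YassineElGhizi/uno | uno/Iphones/global_parametrs.py | find_device_stockage
-- ===== SOURCE A (Python) =====
-- stockage_list = [
--                  '32 Go',
--                  '32Go',
--                  '32 Gb' ,
--                  '32Gb' ,
--                  '32b' ,
--                  '128 Gb',
--                  '128Gb',
--                  '128G',
--                  '128 Go',
--                  '256 Gb',
--                  '256 Go',
--                  '256Go',
--                  '256G',
--                  '256Gb',
--                  '256b',
--                  '512 Gb',
--                  '512Gb',
--                  '512G',
--                  '512 Go',
--                  '512Go',
--                  '1 Tb' ,
--                  '1Tb' ,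
--                  '1T' ,
--                  '1 To' ,
--                  '2 Tb',
--                  '2Tb',
--                  '2T',
--                  '2 To',
--                  '64 Go' ,
--                  '64 Gb',
--                  '64Gb',
--                  '64G',
--         ]
--
-- def find_device_stockage(title):
--     for st in stockage_list:
--         if st.upper() in title:
--             return st
--
--     for st in stockage_list:
--         if st in title:
--             return st
--
--     return "UNKNOWN"
-- ===== SOURCE B (Python) =====
-- stockage_list = [
--                  '32 Go',
--                  '32Go',
--                  '32 Gb' ,
--                  '32Gb' ,
--                  '32b' ,
--                  '128 Gb',
--                  '128Gb',
--                  '128G',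
--                  '128 Go',
--                  '256 Gb',
--                  '256 Go',
--                  '256Go',
--                  '256G',
--                  '256Gb',
--                  '256b',
--                  '512 Gb',
--                  '512Gb',
--                  '512G',
--                  '512 Go',
--                  '512Go',
--                  '1 Tb' ,
--                  '1Tb' ,
--                  '1T' ,
--                  '1 To' ,
--                  '2 Tb',
--                  '2Tb',
--                  '2T',
--                  '2 To',
--                  '64 Go' ,
--                  '64 Gb',
--                  '64Gb',
--                  '64G',
--         ]
--
-- def find_device_stockage(title):
--     upper_hit = None
--     exact_hit = None
--     for st in stockage_list:
--         if upper_hit is None and st.upper() in title: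
--             upper_hit = st
--         if exact_hit is None and st in title:
--             exact_hit = st
--     if upper_hit is not None:
--         return upper_hit
--     if exact_hit is not None:
--         return exact_hit
--     return "UNKNOWN"
-- ===== Notes on version B (the rewrite author's own statement) =====
-- stated objective: alternative
-- what changed: B replaces A's two sequential scans of stockage_list (uppercase-match pass, then exact-match pass) by a single pass maintaining first-hit accumulators upper_hit and exact_hit, preserving the uppercase-beats-exact priority.
import Mathlib
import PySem

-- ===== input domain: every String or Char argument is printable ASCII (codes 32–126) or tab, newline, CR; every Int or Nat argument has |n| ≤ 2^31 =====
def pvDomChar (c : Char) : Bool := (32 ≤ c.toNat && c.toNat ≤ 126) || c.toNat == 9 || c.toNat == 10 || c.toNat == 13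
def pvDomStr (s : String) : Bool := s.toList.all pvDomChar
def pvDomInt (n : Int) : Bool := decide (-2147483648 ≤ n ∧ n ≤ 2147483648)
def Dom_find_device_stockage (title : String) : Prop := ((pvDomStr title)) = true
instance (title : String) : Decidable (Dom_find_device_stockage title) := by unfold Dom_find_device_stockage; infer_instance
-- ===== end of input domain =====

-- ===== PORT A =====
-- B changes: one pass with two first-hit accumulators instead of A's two sequential scans; alternative decomposition, same result.
-- stockage_list is a module-level constant shared by A and B in the Python source.
def stockage_list : List String := ["32 Go", "32Go", "32 Gb", "32Gb", "32b", "128 Gb", "128Gb", "128G", "128 Go", "256 Gb", "256 Go", "256Go", "256G", "256Gb", "256b", "512 Gb", "512Gb", "512G", "512 Go", "512Go", "1 Tb", "1Tb", "1T", "1 To", "2 Tb", "2Tb", "2T", "2 To", "64 Go", "64 Gb", "64Gb", "64G"]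

-- first loop of A: first st with st.upper() in title
def fdLoopUpper : List String -> String -> Option String
  | [], _ => none
  | st :: rest, title =>
    if PySem.Str.isIn (PySem.Str.upper st) title then some st else fdLoopUpper rest title

-- second loop of A: first st with st in title
def fdLoopExact : List String -> String -> Option String
  | [], _ => none
  | st :: rest, title =>
    if PySem.Str.isIn st title then some st else fdLoopExact rest title

def find_device_stockage (title : String) : String :=
  match fdLoopUpper stockage_list title with
  | some st => st
  | none =>
    match fdLoopExact stockage_list title with
    | some st => st
    | none => "UNKNOWN"

-- ===== PORT B =====
-- one step of B's single loop over stockage_list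
def fdStep (title : String) (acc : Option String × Option String) (st : String) : Option String × Option String :=
  ((if acc.1 = none ∧ PySem.Str.isIn (PySem.Str.upper st) title then some st else acc.1),
   (if acc.2 = none ∧ PySem.Str.isIn st title then some st else acc.2))

def find_device_stockage_alt (title : String) : String :=
  let acc := stockage_list.foldl (fdStep title) (none, none)
  match acc.1 with
  | some st => st
  | none =>
    match acc.2 with
    | some st => st
    | none => "UNKNOWN"

-- ===== PRECONDITION & SPEC =====
def Spec_find_device_stockage (title : String) (out : String) : Prop := out = find_device_stockage_alt title
instance (title : String) (out : String) : Decidable (Spec_find_device_stockage title out) := by unfold Spec_find_device_stockage; infer_instance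

-- ===== CLAIM (what is proved, stated in full; the proofs are below) =====
def Claim_equal_find_device_stockage : Prop := ∀ (title : String), Dom_find_device_stockage title → Spec_find_device_stockage title (find_device_stockage title)

-- ===== LEMMAS AND PROOFS =====
theorem fdStep_foldl (title : String) (L : List String) (u e : Option String) :
    L.foldl (fdStep title) (u, e)
      = ((u.orElse fun _ => fdLoopUpper L title), (e.orElse fun _ => fdLoopExact L title)) := by
  induction L generalizing u e with
  | nil => cases u <;> cases e <;> rfl
  | cons st rest ih =>
    simp only [List.foldl_cons, fdStep, fdLoopUpper, fdLoopExact]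
    cases u <;> cases e <;> simp [ih] <;> split_ifs <;> simp [ih]

-- ===== VERDICT (by name: the statement is the Claim_ definition above) =====
theorem find_device_stockage_spec : Claim_equal_find_device_stockage := by
  intro title _
  unfold Spec_find_device_stockage find_device_stockage find_device_stockage_alt
  rw [fdStep_foldl]
  rfl
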